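-- pv_equiv track=rewrite | github.com/aaranguha/Fan_XP | fetch_listings.py | _expand_places
-- ===== SOURCE A (Python) =====
-- def _expand_places(s, pos, prefix, results):
--     """Recursive helper: expand TM's compressed trie-style place strings."""
--     i = pos
--     while i < len(s) and s[i] not in ('[', ',', ']'):
--         prefix += s[i]
--         i += 1
--     if i >= len(s) or s[i] in (',', ']'):
--         if prefix:
--             results.append(prefix)
--         return i
--     # s[i] == '['
--     i += 1
--     while i < len(s) and s[i] != ']':
--         if s[i] == ',':
--             i += 1
--             continue
--         i = _expand_places(s, i, prefix, results)
--     if i < len(s) and s[i] == ']':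
--         i += 1
--     return i
-- ===== SOURCE B (Python) =====
-- def _expand_places(s, pos, prefix, results):
--     """Iterative re-implementation: explicit stack of base prefixes instead of recursion.
--     (Same in-place append to `results` as the original.)"""
--     n = len(s)
--     i, cur = pos, prefix
--     while i < n and s[i] not in '[,]':
--         cur += s[i]
--         i += 1
--     if i >= n or s[i] != '[':
--         if cur:
--             results.append(cur)
--         return i
--     bases = []
--     while True:
--         c = s[i]
--         if c == '[':
--             bases.append(cur)
--             i += 1
--         elif c == ',':
--             if cur != bases[-1]:
--                 results.append(cur)
--             cur = bases[-1]
--             i += 1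
--         else:  # c == ']'
--             if cur != bases[-1]:
--                 results.append(cur)
--             i += 1
--             bases.pop()
--             if not bases:
--                 return i
--             cur = bases[-1]
--         while i < n and s[i] not in '[,]':
--             cur += s[i]
--             i += 1
--         if i >= n:
--             if cur != bases[-1]:
--                 results.append(cur)
--             return i
-- ===== Notes on version B (the rewrite author's own statement) =====
-- stated objective: alternative
-- what changed: Replaced A's recursive descent (a helper that calls itself for every segment and re-enters a while loop on the returned index) by a single iterative parser driven by an explicit stack of base prefixes: one loop reads literal runs and dispatches on '[' (push), ',' (emit and reset to the stack top) and ']' (emit, pop, return when the stack empties).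
import Mathlib
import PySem

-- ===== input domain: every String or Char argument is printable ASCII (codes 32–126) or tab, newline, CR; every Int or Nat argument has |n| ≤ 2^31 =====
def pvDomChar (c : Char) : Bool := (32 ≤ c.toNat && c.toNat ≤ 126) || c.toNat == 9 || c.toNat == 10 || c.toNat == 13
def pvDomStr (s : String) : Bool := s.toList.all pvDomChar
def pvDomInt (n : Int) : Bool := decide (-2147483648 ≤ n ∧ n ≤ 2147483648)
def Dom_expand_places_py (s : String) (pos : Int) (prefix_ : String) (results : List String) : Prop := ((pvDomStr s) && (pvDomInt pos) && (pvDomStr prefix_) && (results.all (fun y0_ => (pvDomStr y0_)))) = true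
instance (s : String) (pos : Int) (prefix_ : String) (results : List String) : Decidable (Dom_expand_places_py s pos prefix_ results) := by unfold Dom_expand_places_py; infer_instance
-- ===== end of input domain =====

-- B replaces A's recursion by an iterative parser with an explicit stack of base prefixes
-- (alternative decomposition, same cost). `results` is only appended to, never read, and the
-- return value is the index: both ports thread `prefix` and omit the append side effect,
-- which the Int-only signature cannot express (Python B performs the same appends as A).

-- ===== PORT A =====
-- s[i] (in-range by the loop guards whenever Pre_ holds; Python's negative wraparound included)
def pvGetc (cs : List Char) (i : Int) : Char := PySem.List.pyGetD cs i ' '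
-- c in ('[', ',', ']')
def pvDelim (c : Char) : Bool := c == '[' || c == ',' || c == ']'

-- A's first while loop: `while i < len(s) and s[i] not in ('[',',',']'): prefix += s[i]; i += 1`
def pvScanA (cs : List Char) (i : Int) (pre : List Char) : Int × List Char :=
  if h : i < (cs.length : Int) ∧ pvDelim (pvGetc cs i) = false then
    pvScanA cs (i + 1) (pre ++ [pvGetc cs i])
  else (i, pre)
termination_by ((cs.length : Int) - i).toNat
decreasing_by obtain ⟨h1, _⟩ := h; omega

mutual
-- body of `_expand_places` after the first while loop; fuel only guards the recursion
def pvGoA (cs : List Char) (f : Nat) (i : Int) (pre : List Char) : Option Int :=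
    if (cs.length : Int) ≤ (pvScanA cs i pre).1 ∨ pvGetc cs (pvScanA cs i pre).1 = ',' ∨
        pvGetc cs (pvScanA cs i pre).1 = ']' then some (pvScanA cs i pre).1
    else
      match f with
      | 0 => none
      | f' + 1 => pvLoopA cs f' ((pvScanA cs i pre).1 + 1) (pvScanA cs i pre).2
  termination_by f
-- A's second while loop plus the trailing `if i < len(s) and s[i] == ']': i += 1`
def pvLoopA (cs : List Char) (f : Nat) (i : Int) (pre : List Char) : Option Int :=
    if (cs.length : Int) ≤ i then some i
    else if pvGetc cs i = ']' then some (i + 1)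
    else if pvGetc cs i = ',' then
      match f with
      | 0 => none
      | f' + 1 => pvLoopA cs f' (i + 1) pre
    else
      match f with
      | 0 => none
      | f' + 1 =>
        match pvGoA cs f' i pre with
        | none => none
        | some j => pvLoopA cs f' j pre
  termination_by f
end

def expand_places_py (s : String) (pos : Int) (prefix_ : String) (results : List String) : Int :=
  match pvGoA s.toList (2 * (s.toList.length + pos.natAbs) + 2) pos prefix_.toList with
  | some j => j
  | none => 0  -- fuel is never exhausted (lemma pvSuff below)

-- ===== PORT B =====
-- B's literal-run loop: `while i < n and s[i] not in '[,]': cur += s[i]; i += 1`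
def pvRunB (cs : List Char) (i : Int) (cur : List Char) : Int × List Char :=
  if h : i < (cs.length : Int) ∧ pvDelim (pvGetc cs i) = false then
    pvRunB cs (i + 1) (cur ++ [pvGetc cs i])
  else (i, cur)
termination_by ((cs.length : Int) - i).toNat
decreasing_by obtain ⟨h1, _⟩ := h; omega

-- B's `while True` stack loop, entered at the first '['; each iteration dispatches on s[i],
-- then reads the next literal run and checks for end of string; fuel only guards the loop
def pvGoB (cs : List Char) (f : Nat) (bases : List (List Char)) (cur : List Char) (i : Int) : Option Int :=
    if (cs.length : Int) ≤ (pvRunB cs i cur).1 then some (pvRunB cs i cur).1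
    else if pvGetc cs (pvRunB cs i cur).1 = '[' then
      match f with
      | 0 => none
      | f' + 1 => pvGoB cs f' ((pvRunB cs i cur).2 :: bases) (pvRunB cs i cur).2 ((pvRunB cs i cur).1 + 1)
    else if pvGetc cs (pvRunB cs i cur).1 = ',' then
      match f with
      | 0 => none
      | f' + 1 => pvGoB cs f' bases (bases.headD []) ((pvRunB cs i cur).1 + 1)
    else -- s[i] = ']' : emit, pop, return when the stack empties
      match bases with
      | [] => some ((pvRunB cs i cur).1 + 1)  -- unreachable from the entry state: the stack is never empty inside the loop
      | [_] => some ((pvRunB cs i cur).1 + 1)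
      | _ :: b2 :: rest =>
        match f with
        | 0 => none
        | f' + 1 => pvGoB cs f' (b2 :: rest) b2 ((pvRunB cs i cur).1 + 1)
termination_by f

def expand_places_py_alt (s : String) (pos : Int) (prefix_ : String) (results : List String) : Int :=
  if (s.toList.length : Int) ≤ (pvRunB s.toList pos prefix_.toList).1 ∨
      ¬ pvGetc s.toList (pvRunB s.toList pos prefix_.toList).1 = '[' then
    (pvRunB s.toList pos prefix_.toList).1
  else
    match pvGoB s.toList (2 * (s.toList.length + pos.natAbs) + 8) [(pvRunB s.toList pos prefix_.toList).2]
        (pvRunB s.toList pos prefix_.toList).2 ((pvRunB s.toList pos prefix_.toList).1 + 1) with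
    | some j => j
    | none => 0  -- fuel is never exhausted (lemma pvML below)

-- ===== PRECONDITION & SPEC =====
-- Pre_ excludes exactly the inputs on which the Python A raises IndexError (first access s[pos]
-- with pos below -len(s)); Python B raises there as well.
def Pre_expand_places_py (s : String) (pos : Int) (prefix_ : String) (results : List String) : Prop :=
  -(s.toList.length : Int) ≤ pos
instance (s : String) (pos : Int) (prefix_ : String) (results : List String) : Decidable (Pre_expand_places_py s pos prefix_ results) := by unfold Pre_expand_places_py; infer_instance
def pvWitness_expand_places_py : String × Int × String × List String := ("a[b,c]", 0, "", [])

def Spec_expand_places_py (s : String) (pos : Int) (prefix_ : String) (results : List String) (out : Int) : Prop := out = expand_places_py_alt s pos prefix_ results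
instance (s : String) (pos : Int) (prefix_ : String) (results : List String) (out : Int) : Decidable (Spec_expand_places_py s pos prefix_ results out) := by unfold Spec_expand_places_py; infer_instance

-- ===== CLAIM (what is proved, stated in full; the proofs are below) =====
def Claim_equal_expand_places_py : Prop := ∀ (s : String) (pos : Int) (prefix_ : String) (results : List String), Dom_expand_places_py s pos prefix_ results → Pre_expand_places_py s pos prefix_ results → Spec_expand_places_py s pos prefix_ results (expand_places_py s pos prefix_ results)

-- ===== LEMMAS AND PROOFS =====

theorem pvRun_eq_scan (cs : List Char) (i : Int) (pre : List Char) :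
    ∀ cur, (pvRunB cs i cur).1 = (pvScanA cs i pre).1 := by
  induction i, pre using pvScanA.induct (cs := cs) with
  | case1 i pre h ih =>
    intro cur
    rw [pvScanA, pvRunB, dif_pos h, dif_pos h]
    exact ih _
  | case2 i pre h =>
    intro cur
    rw [pvScanA, pvRunB, dif_neg h, dif_neg h]

theorem pvScan_props (cs : List Char) (i : Int) (pre : List Char) :
    i ≤ (pvScanA cs i pre).1 ∧ (pvScanA cs i pre).1 ≤ max i (cs.length : Int) ∧
      ((pvScanA cs i pre).1 < (cs.length : Int) → pvDelim (pvGetc cs (pvScanA cs i pre).1) = true) := by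
  induction i, pre using pvScanA.induct (cs := cs) with
  | case1 i pre h ih =>
    rw [pvScanA, dif_pos h]
    obtain ⟨ih1, ih2, ih3⟩ := ih
    refine ⟨by omega, by omega, ih3⟩
  | case2 i pre h =>
    rw [pvScanA, dif_neg h]
    refine ⟨le_refl _, le_max_left _ _, fun hlt => ?_⟩
    by_contra hd
    exact h ⟨hlt, by simpa using hd⟩

theorem pvRun_stop (cs : List Char) (i : Int) (cur : List Char)
    (h : (cs.length : Int) ≤ i ∨ pvDelim (pvGetc cs i) = true) : pvRunB cs i cur = (i, cur) := by
  rw [pvRunB, dif_neg]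
  rintro ⟨h1, h2⟩
  rcases h with h | h
  · omega
  · rw [h] at h2; exact absurd h2 (by simp)

theorem pvGoB_end (cs : List Char) (f : Nat) (bs : List (List Char)) (cur : List Char) (i : Int)
    (h : (cs.length : Int) ≤ i) : pvGoB cs f bs cur i = some i := by
  rw [pvGoB.eq_def]
  rw [pvRun_stop cs i cur (Or.inl h)]
  simp [h]

theorem pvGoB_inv (cs : List Char) : ∀ (f : Nat) (bs bs' : List (List Char)) (cur cur' : List Char) (i : Int),
    bs.length = bs'.length → pvGoB cs f bs cur i = pvGoB cs f bs' cur' i := by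
  intro f
  induction f with
  | zero =>
    intro bs bs' cur cur' i hlen
    rw [pvGoB.eq_def cs 0 bs cur i, pvGoB.eq_def cs 0 bs' cur' i]
    have hidx : (pvRunB cs i cur).1 = (pvRunB cs i cur').1 := by
      rw [pvRun_eq_scan cs i [] cur, pvRun_eq_scan cs i [] cur']
    rw [hidx]
    split
    · rfl
    · split
      · rfl
      · split
        · rfl
        · cases bs with
          | nil => cases bs' with
            | nil => rfl
            | cons b t => simp at hlen
          | cons b t => cases bs' with
            | nil => simp at hlen
            | cons b2 t2 =>
              cases t with
              | nil => cases t2 with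
                | nil => rfl
                | cons c u => simp at hlen
              | cons c u => cases t2 with
                | nil => simp at hlen
                | cons c2 u2 => rfl
  | succ f ih =>
    intro bs bs' cur cur' i hlen
    rw [pvGoB.eq_def cs (f+1) bs cur i, pvGoB.eq_def cs (f+1) bs' cur' i]
    have hidx : (pvRunB cs i cur).1 = (pvRunB cs i cur').1 := by
      rw [pvRun_eq_scan cs i [] cur, pvRun_eq_scan cs i [] cur']
    rw [hidx]
    split
    · rfl
    · split
      · exact ih _ _ _ _ _ (by simp [hlen])
      · split
        · exact ih _ _ _ _ _ hlen
        · cases bs with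
          | nil => cases bs' with
            | nil => rfl
            | cons b t => simp at hlen
          | cons b t => cases bs' with
            | nil => simp at hlen
            | cons b2 t2 =>
              cases t with
              | nil => cases t2 with
                | nil => rfl
                | cons c u => simp at hlen
              | cons c u => cases t2 with
                | nil => simp at hlen
                | cons c2 u2 => exact ih _ _ _ _ _ (by simp_all)

theorem pvGoB_shift (cs : List Char) (f : Nat) (bs : List (List Char)) (cur cur2 : List Char) (i : Int) :
    pvGoB cs f bs cur i = pvGoB cs f bs cur2 (pvScanA cs i []).1 := by
  have hidx : (pvRunB cs i cur).1 = (pvScanA cs i []).1 := pvRun_eq_scan cs i [] cur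
  have hstop : pvRunB cs (pvScanA cs i []).1 cur2 = ((pvScanA cs i []).1, cur2) := by
    apply pvRun_stop
    rcases lt_or_ge (pvScanA cs i []).1 (cs.length : Int) with hlt | hge
    · exact Or.inr ((pvScan_props cs i []).2.2 hlt)
    · exact Or.inl hge
  cases f with
  | zero =>
    rw [pvGoB.eq_def cs 0 bs cur i, pvGoB.eq_def cs 0 bs cur2 (pvScanA cs i []).1, hstop, hidx]
  | succ f =>
    rw [pvGoB.eq_def cs (f+1) bs cur i, pvGoB.eq_def cs (f+1) bs cur2 (pvScanA cs i []).1, hstop, hidx]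
    split
    · rfl
    · split
      · exact pvGoB_inv cs f _ _ _ _ _ (by simp)
      · rfl

theorem pvAB_bounds (cs : List Char) : ∀ f : Nat,
    (∀ i pre j, pvLoopA cs f i pre = some j → i ≤ j ∧ (j ≤ i ∨ j ≤ (cs.length : Int) + 1)) ∧
    (∀ i pre j, pvGoA cs f i pre = some j → i ≤ j ∧ (j ≤ i ∨ j ≤ (cs.length : Int) + 1)) := by
  intro f
  induction f with
  | zero =>
    constructor
    · intro i pre j h
      rw [pvLoopA.eq_def] at h
      split at h
      · simp only [Option.some.injEq] at h; omega
      · split at h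
        · simp only [Option.some.injEq] at h
          rename_i hn _
          omega
        · split at h <;> simp at h
    · intro i pre j h
      rw [pvGoA.eq_def] at h
      split at h
      · simp only [Option.some.injEq] at h
        have hp := pvScan_props cs i pre
        omega
      · simp at h
  | succ f ih =>
    constructor
    · intro i pre j h
      rw [pvLoopA.eq_def] at h
      split at h
      · simp only [Option.some.injEq] at h; omega
      · split at h
        · simp only [Option.some.injEq] at h
          rename_i hn _
          omega
        · split at h
          · have := ih.1 _ _ _ h
            rename_i hn _ _
            omega
          · have h' : (match pvGoA cs f i pre with
                | none => none
                | some j0 => pvLoopA cs f j0 pre) = some j := h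
            cases hg : pvGoA cs f i pre with
            | none => rw [hg] at h'; simp at h'
            | some j0 =>
              rw [hg] at h'
              have h1 := ih.2 _ _ _ hg
              have h2 := ih.1 _ _ _ h'
              omega
    · intro i pre j h
      rw [pvGoA.eq_def] at h
      split at h
      · simp only [Option.some.injEq] at h
        have hp := pvScan_props cs i pre
        omega
      · have h2 := ih.1 _ _ _ h
        have hp := pvScan_props cs i pre
        rename_i hleaf
        push_neg at hleaf
        omega

theorem pvGoA_strict (cs : List Char) (f : Nat) (i : Int) (pre : List Char) (j : Int)
    (hi : i < (cs.length : Int)) (h1 : pvGetc cs i ≠ ']') (h2 : pvGetc cs i ≠ ',')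
    (h : pvGoA cs f i pre = some j) : i + 1 ≤ j := by
  by_cases hd : pvDelim (pvGetc cs i) = true
  · -- s[i] = '[' : the scan stops at i and A recurses into the bracket
    have hbr : pvGetc cs i = '[' := by
      unfold pvDelim at hd
      rcases (by simpa using hd : (pvGetc cs i = '[' ∨ pvGetc cs i = ',') ∨ pvGetc cs i = ']') with (h | h) | h
      · exact h
      · exact absurd h h2
      · exact absurd h h1
    have hsc : pvScanA cs i pre = (i, pre) := by
      rw [pvScanA, dif_neg]
      rintro ⟨_, hf⟩
      rw [hd] at hf; exact absurd hf (by simp)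
    rw [pvGoA.eq_def, hsc] at h
    simp only at h
    rw [if_neg (by push_neg; refine ⟨by omega, by rw [hbr]; decide, by rw [hbr]; decide⟩)] at h
    cases f with
    | zero => simp at h
    | succ f =>
      have := (pvAB_bounds cs f).1 _ _ _ h
      omega
  · -- ordinary character: the scan advances at least one position
    have hsc : pvScanA cs i pre = pvScanA cs (i + 1) (pre ++ [pvGetc cs i]) := by
      rw [pvScanA, dif_pos ⟨hi, by simpa using hd⟩]
    have hp := pvScan_props cs (i + 1) (pre ++ [pvGetc cs i])
    rw [pvGoA.eq_def, hsc] at h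
    split at h
    · simp only [Option.some.injEq] at h; omega
    · cases f with
      | zero => simp at h
      | succ f =>
        have := (pvAB_bounds cs f).1 _ _ _ h
        omega

theorem pvSuff (cs : List Char) : ∀ f : Nat,
    (∀ i pre, 2 * (((cs.length : Int) - i).toNat) + 1 ≤ f → (pvLoopA cs f i pre).isSome) ∧
    (∀ i pre, 2 * (((cs.length : Int) - i).toNat) ≤ f → (pvGoA cs f i pre).isSome) := by
  intro f
  induction f with
  | zero =>
    refine ⟨fun i pre hf => by omega, fun i pre hf => ?_⟩
    have hni : (cs.length : Int) ≤ i := by omega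
    have hsc : pvScanA cs i pre = (i, pre) := by
      rw [pvScanA, dif_neg]; rintro ⟨h1, _⟩; omega
    rw [pvGoA.eq_def, hsc]
    simp [hni]
  | succ f ih =>
    constructor
    · intro i pre hf
      rw [pvLoopA.eq_def]
      split
      · simp
      · split
        · simp
        · split
          · rename_i hn _ _
            show (pvLoopA cs f (i + 1) pre).isSome
            exact ih.1 _ _ (by omega)
          · rename_i hn hr hc
            show (match pvGoA cs f i pre with
              | none => none
              | some j0 => pvLoopA cs f j0 pre).isSome
            have hg : (pvGoA cs f i pre).isSome := ih.2 _ _ (by omega)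
            obtain ⟨j0, hj0⟩ := Option.isSome_iff_exists.mp hg
            rw [hj0]
            have hstep := pvGoA_strict cs f i pre j0 (by omega) hr hc hj0
            exact ih.1 _ _ (by omega)
    · intro i pre hf
      rw [pvGoA.eq_def]
      split
      · simp
      · rename_i hleaf
        push_neg at hleaf
        obtain ⟨hn, _, _⟩ := hleaf
        have hp := pvScan_props cs i pre
        show (pvLoopA cs f ((pvScanA cs i pre).1 + 1) (pvScanA cs i pre).2).isSome
        exact ih.1 _ _ (by omega)

theorem pvML (cs : List Char) : ∀ fA : Nat, ∀ (i : Int) (pre : List Char) (j : Int),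
    pvLoopA cs fA i pre = some j →
    ∃ d : Nat, (d : Int) ≤ 2 * (j - i) ∧ ∀ (g : Nat) (b : List Char) (bs' : List (List Char)) (cur : List Char),
      pvGoB cs (g + d) (b :: bs') cur i =
        (match bs' with
         | [] => some j
         | b2 :: r => pvGoB cs g (b2 :: r) b2 j) := by
  intro fA
  induction fA using Nat.strong_induction_on with
  | _ fA IH =>
    intro i pre j h
    rw [pvLoopA.eq_def] at h
    split at h
    · -- end of string: j = i and B returns i at any depth
      rename_i hn
      simp only [Option.some.injEq] at h
      subst h
      refine ⟨0, by omega, fun g b bs' cur => ?_⟩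
      cases bs' with
      | nil => rw [pvGoB_end cs _ _ _ _ hn]
      | cons b2 r =>
        rw [pvGoB_end cs (g + 0) (b :: b2 :: r) cur i hn]
        show some i = pvGoB cs g (b2 :: r) b2 i
        rw [pvGoB_end cs _ _ _ _ hn]
    · split at h
      · -- ']' : close the current level
        rename_i hn hr
        simp only [Option.some.injEq] at h
        subst h
        refine ⟨1, by omega, fun g b bs' cur => ?_⟩
        have hrun : pvRunB cs i cur = (i, cur) :=
          pvRun_stop cs i cur (Or.inr (by unfold pvDelim; rw [hr]; rfl))
        have hr1 : (pvRunB cs i cur).1 = i := by rw [hrun]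
        have hr2 : (pvRunB cs i cur).2 = cur := by rw [hrun]
        rw [pvGoB.eq_def, hr1, hr2, hr]
        rw [if_neg hn, if_neg (by decide), if_neg (by decide)]
        cases bs' with
        | nil => rfl
        | cons b2 r => rfl
      · split at h
        · -- ',' : reset to the level's base
          rename_i hn hr hc
          cases fA with
          | zero => simp at h
          | succ f' =>
          have h2 : pvLoopA cs f' (i + 1) pre = some j := h
          obtain ⟨d', hd', P'⟩ := IH f' (by omega) _ _ _ h2
          have hbd := (pvAB_bounds cs f').1 _ _ _ h2
          refine ⟨d' + 1, by omega, fun g b bs' cur => ?_⟩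
          have hrun : pvRunB cs i cur = (i, cur) :=
            pvRun_stop cs i cur (Or.inr (by unfold pvDelim; rw [hc]; rfl))
          have hr1 : (pvRunB cs i cur).1 = i := by rw [hrun]
          have hr2 : (pvRunB cs i cur).2 = cur := by rw [hrun]
          have hfu : g + (d' + 1) = (g + d') + 1 := by omega
          rw [hfu, pvGoB.eq_def, hr1, hr2, hc]
          rw [if_neg hn, if_neg (by decide), if_pos rfl]
          show pvGoB cs (g + d') (b :: bs') ((b :: bs').headD []) (i + 1) =
            (match bs' with
             | [] => some j
             | b2 :: r => pvGoB cs g (b2 :: r) b2 j)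
          simp only [List.headD_cons]
          exact P' g b bs' b
        · -- ordinary character (or '[')
          rename_i hn hr hc
          cases fA with
          | zero => simp at h
          | succ fI =>
          have h' : (match pvGoA cs fI i pre with
            | none => none
            | some j0 => pvLoopA cs fI j0 pre) = some j := h
          cases hg : pvGoA cs fI i pre with
          | none => rw [hg] at h'; simp at h'
          | some j0 =>
            rw [hg] at h'
            simp only at h'
            have hix : ∀ pre2 : List Char, (pvScanA cs i []).1 = (pvScanA cs i pre2).1 := by
              intro pre2
              rw [← pvRun_eq_scan cs i [] [], pvRun_eq_scan cs i pre2 []]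
            rw [pvGoA.eq_def] at hg
            split at hg
            · -- goA leaf: the literal run ends at a delimiter or the end
              rename_i hleaf
              simp only [Option.some.injEq] at hg
              subst hg
              obtain ⟨d1, hd1, P1⟩ := IH fI (by omega) _ _ _ h'
              have hp := pvScan_props cs i pre
              refine ⟨d1, by omega, fun g b bs' cur => ?_⟩
              rw [pvGoB_shift cs (g + d1) (b :: bs') cur cur i, hix pre]
              exact P1 g b bs' cur
            · -- goA bracket: '[' opens a nested level
              rename_i hleaf
              push_neg at hleaf
              obtain ⟨hsn, hsr, hsc'⟩ := hleaf
              have hp := pvScan_props cs i pre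
              have hbr : pvGetc cs (pvScanA cs i pre).1 = '[' := by
                have hd := hp.2.2 (by omega)
                unfold pvDelim at hd
                rcases (by simpa using hd :
                    (pvGetc cs (pvScanA cs i pre).1 = '[' ∨ pvGetc cs (pvScanA cs i pre).1 = ',') ∨
                      pvGetc cs (pvScanA cs i pre).1 = ']') with (h1 | h1) | h1
                · exact h1
                · exact absurd h1 hsr
                · exact absurd h1 hsc'
              cases fI with
              | zero => simp at hg
              | succ fI' =>
                have hgI : pvLoopA cs fI' ((pvScanA cs i pre).1 + 1) (pvScanA cs i pre).2 = some j0 := hg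
                obtain ⟨d2, hd2, P2⟩ := IH fI' (by omega) _ _ _ hgI
                obtain ⟨d3, hd3, P3⟩ := IH (fI' + 1) (by omega) _ _ _ h'
                have hb2 := (pvAB_bounds cs fI').1 _ _ _ hgI
                refine ⟨d2 + d3 + 1, by omega, fun g b bs' cur => ?_⟩
                rw [pvGoB_shift cs (g + (d2 + d3 + 1)) (b :: bs') cur cur i, hix pre]
                have hrun : pvRunB cs (pvScanA cs i pre).1 cur = ((pvScanA cs i pre).1, cur) :=
                  pvRun_stop cs _ cur (Or.inr (by unfold pvDelim; rw [hbr]; rfl))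
                have hr1 : (pvRunB cs (pvScanA cs i pre).1 cur).1 = (pvScanA cs i pre).1 := by
                  rw [hrun]
                have hr2 : (pvRunB cs (pvScanA cs i pre).1 cur).2 = cur := by rw [hrun]
                have hfu : g + (d2 + d3 + 1) = ((g + d3) + d2) + 1 := by omega
                rw [hfu, pvGoB.eq_def, hr1, hr2, hbr]
                rw [if_neg (by omega), if_pos rfl]
                show pvGoB cs ((g + d3) + d2) (cur :: b :: bs') cur ((pvScanA cs i pre).1 + 1) =
                  (match bs' with
                   | [] => some j
                   | b2 :: r => pvGoB cs g (b2 :: r) b2 j)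
                rw [P2 (g + d3) cur (b :: bs') cur]
                exact P3 g b bs' b

-- ===== VERDICT (by name: the statement is the Claim_ definition above) =====
theorem expand_places_py_spec : Claim_equal_expand_places_py := by
  intro s pos prefix_ results _hdom _hpre
  unfold Spec_expand_places_py
  unfold expand_places_py expand_places_py_alt
  have hFA : 2 * (((s.toList.length : Int) - pos).toNat) ≤ 2 * (s.toList.length + pos.natAbs) + 2 := by
    omega
  have hsome := (pvSuff s.toList (2 * (s.toList.length + pos.natAbs) + 2)).2 pos prefix_.toList hFA
  obtain ⟨j, hj⟩ := Option.isSome_iff_exists.mp hsome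
  simp only [hj]
  have hix : (pvRunB s.toList pos prefix_.toList).1 = (pvScanA s.toList pos prefix_.toList).1 :=
    pvRun_eq_scan s.toList pos prefix_.toList prefix_.toList
  rw [pvGoA.eq_def] at hj
  split at hj
  · -- leaf: both return the index where the first literal run stops
    rename_i hleaf
    simp only [Option.some.injEq] at hj
    subst hj
    rw [if_pos, hix]
    rcases hleaf with hl | hl | hl
    · exact Or.inl (by omega)
    · exact Or.inr (by rw [hix, hl]; decide)
    · exact Or.inr (by rw [hix, hl]; decide)
  · -- bracket: A recurses into its loop, B runs the stack loop with one level
    rename_i hleaf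
    push_neg at hleaf
    obtain ⟨hn, hr, hc⟩ := hleaf
    have hp := pvScan_props s.toList pos prefix_.toList
    have hbr : pvGetc s.toList (pvScanA s.toList pos prefix_.toList).1 = '[' := by
      have hd := hp.2.2 (by omega)
      unfold pvDelim at hd
      rcases (by simpa using hd :
          (pvGetc s.toList (pvScanA s.toList pos prefix_.toList).1 = '[' ∨
            pvGetc s.toList (pvScanA s.toList pos prefix_.toList).1 = ',') ∨
            pvGetc s.toList (pvScanA s.toList pos prefix_.toList).1 = ']') with (h1 | h1) | h1
      · exact h1
      · exact absurd h1 hr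
      · exact absurd h1 hc
    have hj' : pvLoopA s.toList (2 * (s.toList.length + pos.natAbs) + 1)
        ((pvScanA s.toList pos prefix_.toList).1 + 1) (pvScanA s.toList pos prefix_.toList).2 = some j := hj
    obtain ⟨d, hd, P⟩ := pvML s.toList _ _ _ _ hj'
    have hbd := (pvAB_bounds s.toList _).1 _ _ _ hj'
    have hdle : d ≤ 2 * (s.toList.length + pos.natAbs) + 8 := by omega
    rw [if_neg (by push_neg; exact ⟨by omega, by rw [hix]; exact hbr⟩)]
    have hB : pvGoB s.toList (2 * (s.toList.length + pos.natAbs) + 8)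
        [(pvRunB s.toList pos prefix_.toList).2] (pvRunB s.toList pos prefix_.toList).2
        ((pvRunB s.toList pos prefix_.toList).1 + 1) = some j := by
      have hfb : 2 * (s.toList.length + pos.natAbs) + 8 =
          (2 * (s.toList.length + pos.natAbs) + 8 - d) + d := by omega
      rw [hfb, hix]
      exact P (2 * (s.toList.length + pos.natAbs) + 8 - d) _ [] _
    simp only [hB]
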